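-- pv_equiv track=rewrite | github.com/EERaab/drl-project-clean-version | utils.py | circle_iterator_inbounds
-- ===== SOURCE A (Python) =====
-- def circle_iterator_inbounds(center_point, radius):
--     if radius == 0:
--         yield (center_point[0], center_point[1])
--     else:
--         new_point = [center_point[0] + radius, center_point[1]]
--         for r in range(radius):
--             new_point[0] -= 1
--             new_point[1] += 1
--             yield (new_point[0], new_point[1])
--         for r in range(radius):
--             new_point[0] -= 1
--             new_point[1] -= 1
--             yield (new_point[0], new_point[1])
--         for r in range(radius):
--             new_point[0] += 1
--             new_point[1] -= 1
--             yield (new_point[0], new_point[1])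
--         for r in range(radius):
--             new_point[0] += 1
--             new_point[1] += 1
--             yield (new_point[0], new_point[1])
-- ===== SOURCE B (Python) =====
-- def circle_iterator_inbounds(center_point, radius):
--     cx, cy = center_point[0], center_point[1]
--     if radius == 0:
--         yield (cx, cy)
--         return
--     for t in range(4 * radius):
--         e, s = divmod(t, radius)
--         s += 1
--         if e == 0:
--             yield (cx + radius - s, cy + s)
--         elif e == 1:
--             yield (cx - s, cy + radius - s)
--         elif e == 2:
--             yield (cx - radius + s, cy - s)
--         else:
--             yield (cx + s, cy - radius + s)
-- ===== Notes on version B (the rewrite author's own statement) =====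
-- stated objective: alternative
-- what changed: Replaces the four sequential loops mutating a shared running point with a single stateless loop over range(4*radius) that computes each perimeter point in closed form from divmod(t, radius).
import Mathlib
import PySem

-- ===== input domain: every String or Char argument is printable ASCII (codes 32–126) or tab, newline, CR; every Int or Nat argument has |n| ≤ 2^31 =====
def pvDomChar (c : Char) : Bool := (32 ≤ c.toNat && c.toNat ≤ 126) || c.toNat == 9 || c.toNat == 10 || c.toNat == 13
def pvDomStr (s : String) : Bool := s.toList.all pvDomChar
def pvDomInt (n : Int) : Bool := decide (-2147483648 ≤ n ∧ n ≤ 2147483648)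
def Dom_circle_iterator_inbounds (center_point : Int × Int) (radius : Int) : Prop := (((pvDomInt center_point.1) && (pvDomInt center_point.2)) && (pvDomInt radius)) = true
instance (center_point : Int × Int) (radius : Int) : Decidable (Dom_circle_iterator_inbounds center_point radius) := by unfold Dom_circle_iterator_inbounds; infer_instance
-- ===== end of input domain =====

-- B computes each perimeter point in closed form from the divmod of a single loop index,
-- instead of A's four sequential loops mutating a shared running point (alternative decomposition, same cost).

-- ===== PORT A =====
-- A's four 'for r in range(radius)' loops, each mutating the running point and
-- appending the yielded tuple; state = (running point, yielded list so far).
def circle_iterator_inbounds (center_point : Int × Int) (radius : Int) : List (Int × Int) :=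
  if radius = 0 then [(center_point.1, center_point.2)]
  else
    let st0 : (Int × Int) × List (Int × Int) := ((center_point.1 + radius, center_point.2), [])
    let st1 := (PySem.List.pyRange 0 radius 1).foldl
      (fun st _ => ((st.1.1 - 1, st.1.2 + 1), st.2 ++ [(st.1.1 - 1, st.1.2 + 1)])) st0
    let st2 := (PySem.List.pyRange 0 radius 1).foldl
      (fun st _ => ((st.1.1 - 1, st.1.2 - 1), st.2 ++ [(st.1.1 - 1, st.1.2 - 1)])) st1
    let st3 := (PySem.List.pyRange 0 radius 1).foldl
      (fun st _ => ((st.1.1 + 1, st.1.2 - 1), st.2 ++ [(st.1.1 + 1, st.1.2 - 1)])) st2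
    let st4 := (PySem.List.pyRange 0 radius 1).foldl
      (fun st _ => ((st.1.1 + 1, st.1.2 + 1), st.2 ++ [(st.1.1 + 1, st.1.2 + 1)])) st3
    st4.2

-- ===== PORT B =====
-- B: one loop over range(4*radius); e, s = divmod(t, radius); s += 1; closed-form point per edge.
def circle_iterator_inbounds_alt (center_point : Int × Int) (radius : Int) : List (Int × Int) :=
  if radius = 0 then [(center_point.1, center_point.2)]
  else (PySem.List.pyRange 0 (4 * radius) 1).map (fun t =>
    let e := PySem.Int.floordiv t radius
    let s := PySem.Int.mod t radius + 1
    if e = 0 then (center_point.1 + radius - s, center_point.2 + s)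
    else if e = 1 then (center_point.1 - s, center_point.2 + radius - s)
    else if e = 2 then (center_point.1 - radius + s, center_point.2 - s)
    else (center_point.1 + s, center_point.2 - radius + s))

-- ===== PRECONDITION & SPEC =====
def Spec_circle_iterator_inbounds (center_point : Int × Int) (radius : Int) (out : List (Int × Int)) : Prop := out = circle_iterator_inbounds_alt center_point radius
instance (center_point : Int × Int) (radius : Int) (out : List (Int × Int)) : Decidable (Spec_circle_iterator_inbounds center_point radius out) := by unfold Spec_circle_iterator_inbounds; infer_instance

-- ===== CLAIM (what is proved, stated in full; the proofs are below) =====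
def Claim_equal_circle_iterator_inbounds : Prop := ∀ (center_point : Int × Int) (radius : Int), Dom_circle_iterator_inbounds center_point radius → Spec_circle_iterator_inbounds center_point radius (circle_iterator_inbounds center_point radius)

-- ===== LEMMAS AND PROOFS =====

-- One leg of A's walk: stepping n times by (dx, dy) from p, appending each new point.
theorem legA (dx dy : Int) (p : Int × Int) (acc : List (Int × Int)) (n : Nat) :
    (List.range n).foldl
      (fun st (_ : Nat) => ((st.1.1 + dx, st.1.2 + dy), st.2 ++ [(st.1.1 + dx, st.1.2 + dy)]))
      (p, acc)
    = ((p.1 + n * dx, p.2 + n * dy),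
       acc ++ (List.range n).map (fun (k : Nat) => (p.1 + ((k : Int) + 1) * dx, p.2 + ((k : Int) + 1) * dy))) := by
  induction n with
  | zero => simp
  | succ n ih =>
    rw [List.range_succ, List.foldl_append, ih, List.foldl_cons, List.foldl_nil,
        List.map_append, List.map_singleton]
    simp only [Prod.mk.injEq, List.append_assoc, List.append_cancel_left_eq]
    push_cast
    refine ⟨⟨?_, ?_⟩, ?_⟩
    · ring
    · ring
    · simp only [List.cons.injEq, Prod.mk.injEq, and_true]
      refine ⟨by ring, by ring⟩

-- Same leg, over the pyRange the port folds on (loop variable ignored).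
theorem legA' (dx dy : Int) (p : Int × Int) (acc : List (Int × Int)) (n : Nat) :
    (PySem.List.pyRange 0 (n : Int) 1).foldl
      (fun st (_ : Int) => ((st.1.1 + dx, st.1.2 + dy), st.2 ++ [(st.1.1 + dx, st.1.2 + dy)]))
      (p, acc)
    = ((p.1 + n * dx, p.2 + n * dy),
       acc ++ (List.range n).map (fun (k : Nat) => (p.1 + ((k : Int) + 1) * dx, p.2 + ((k : Int) + 1) * dy))) := by
  rw [PySem.List.pyRange_one, List.foldl_map]
  simp only [sub_zero, Int.toNat_natCast]
  exact legA dx dy p acc n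

-- B's divmod on one edge segment: t = e*r + k with 0 ≤ k < r.
theorem divmod_seg (e : Int) (r : Int) (k : Nat) (hr : 0 < r) (hk : (k : Int) < r) :
    PySem.Int.floordiv (e * r + k) r = e ∧ PySem.Int.mod (e * r + k) r = k := by
  rw [PySem.Int.floordiv_eq_ediv_of_pos hr, PySem.Int.mod_eq_emod_of_pos hr]
  constructor
  · rw [show e * r + (k : Int) = (k : Int) + e * r by ring,
        Int.add_mul_ediv_right _ _ (by omega : r ≠ 0),
        Int.ediv_eq_zero_of_lt (by positivity) hk]
    ring
  · rw [show e * r + (k : Int) = (k : Int) + r * e by ring, Int.add_mul_emod_self_left]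
    exact Int.emod_eq_of_lt (by positivity) hk

theorem circle_equal (center_point : Int × Int) (radius : Int) :
    circle_iterator_inbounds center_point radius
      = circle_iterator_inbounds_alt center_point radius := by
  unfold circle_iterator_inbounds circle_iterator_inbounds_alt
  by_cases h0 : radius = 0
  · simp [h0]
  rw [if_neg h0, if_neg h0]
  by_cases hneg : radius < 0
  · rw [PySem.List.pyRange_one_eq_nil (by omega), PySem.List.pyRange_one_eq_nil (by omega)]
    simp
  -- radius > 0
  obtain ⟨n, hn⟩ : ∃ n : Nat, radius = (n : Int) :=
    ⟨radius.toNat, (Int.toNat_of_nonneg (by omega)).symm⟩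
  subst hn
  have hr : (0 : Int) < n := by omega
  dsimp only
  -- A side: the four mutating loops via legA'
  rw [show (fun (st : (Int × Int) × List (Int × Int)) (_ : Int) =>
        ((st.1.1 - 1, st.1.2 + 1), st.2 ++ [(st.1.1 - 1, st.1.2 + 1)])) =
      (fun st _ => ((st.1.1 + (-1), st.1.2 + 1), st.2 ++ [(st.1.1 + (-1), st.1.2 + 1)])) from by
        funext st x; simp [Int.sub_eq_add_neg], legA']
  rw [show (fun (st : (Int × Int) × List (Int × Int)) (_ : Int) =>
        ((st.1.1 - 1, st.1.2 - 1), st.2 ++ [(st.1.1 - 1, st.1.2 - 1)])) =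
      (fun st _ => ((st.1.1 + (-1), st.1.2 + (-1)), st.2 ++ [(st.1.1 + (-1), st.1.2 + (-1))])) from by
        funext st x; simp [Int.sub_eq_add_neg], legA']
  rw [show (fun (st : (Int × Int) × List (Int × Int)) (_ : Int) =>
        ((st.1.1 + 1, st.1.2 - 1), st.2 ++ [(st.1.1 + 1, st.1.2 - 1)])) =
      (fun st _ => ((st.1.1 + 1, st.1.2 + (-1)), st.2 ++ [(st.1.1 + 1, st.1.2 + (-1))])) from by
        funext st x; simp [Int.sub_eq_add_neg], legA', legA']
  -- B side: split range(4n) into the four edge segments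
  rw [PySem.List.pyRange_one_append 0 (n : Int) (4 * n) (by positivity) (by omega),
      PySem.List.pyRange_one_append (n : Int) (2 * n) (4 * n) (by omega) (by omega),
      PySem.List.pyRange_one_append (2 * n) (3 * n) (4 * n) (by omega) (by omega)]
  simp only [List.map_append]
  rw [PySem.List.pyRange_one 0 (n : Int), PySem.List.pyRange_one (n : Int) (2 * n),
      PySem.List.pyRange_one (2 * n) (3 * n), PySem.List.pyRange_one (3 * n) (4 * n)]
  rw [show ((n : Int) - 0).toNat = n by omega, show (2 * (n : Int) - n).toNat = n by omega,
      show (3 * (n : Int) - 2 * n).toNat = n by omega, show (4 * (n : Int) - 3 * n).toNat = n by omega]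
  simp only [List.map_map, List.nil_append, List.append_assoc]
  refine congrArg₂ _ ?_ (congrArg₂ _ ?_ (congrArg₂ _ ?_ ?_)) <;>
    (apply List.map_congr_left; intro k hk;
     have hk' : ((k : Int)) < n := by exact_mod_cast List.mem_range.mp hk;
     simp only [Function.comp_apply])
  · -- edge 0
    have hd := divmod_seg 0 (n : Int) k hr hk'
    rw [zero_mul, zero_add] at hd
    simp only [zero_add, hd.1, hd.2]
    norm_num
    try constructor
    all_goals ring
  · -- edge 1
    have hd := divmod_seg 1 (n : Int) k hr hk'
    rw [one_mul] at hd
    rw [hd.1, hd.2]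
    norm_num
    try constructor
    all_goals ring
  · -- edge 2
    have hd := divmod_seg 2 (n : Int) k hr hk'
    rw [hd.1, hd.2]
    norm_num
    try constructor
    all_goals ring
  · -- edge 3
    have hd := divmod_seg 3 (n : Int) k hr hk'
    rw [hd.1, hd.2]
    norm_num
    ring

-- ===== VERDICT (by name: the statement is the Claim_ definition above) =====
theorem circle_iterator_inbounds_spec : Claim_equal_circle_iterator_inbounds := by
  intro c r _
  exact circle_equal c r
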